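-- pv_equiv track=rewrite | github.com/david-andrew/dewy-lang | src/backend/qbe/qbe.py | string_to_qbe_repr
-- ===== SOURCE A (Python) =====
-- from itertools import count, groupby
--
-- def string_to_qbe_repr(s: str, include_null_terminator: bool = True) -> tuple[str, int]:
--     """Convert a string to a QBE literal representation. For now uses utf-8 encoding."""
--     groups = groupby(s.encode('utf-8'), lambda c: 0x20 <= c <= 0x7E)
--     groups = [''.join(map(chr, values)) if key else list(values) for key, values in groups]
--
--     # combine printable characters into strings, leave non-printable as byte arrays
--     items = []
--     for element in groups:
--         if isinstance(element, str):
--             items.append(f'b "{element}"')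
--         else:
--             # Non-printable characters are escaped
--             items.append('b ' + ' '.join(f'{c}' for c in element))
--
--     # Append null terminator if requested
--     if include_null_terminator:
--         items.append('b 0') # Append null terminator
--     qbe_str = f'{{ {", ".join(items)}}}'
--
--     # Calculate the length of the string representation
--     length = sum(map(len, groups)) + int(include_null_terminator)
--
--     return qbe_str, length
-- ===== SOURCE B (Python) =====
-- def string_to_qbe_repr(s: str, include_null_terminator: bool = True) -> tuple[str, int]:
--     """Byte-at-a-time state machine: each byte emits a string fragment chosen by
--     the printability transition from the previous byte; no runs, no group list,
--     no items list are ever materialized."""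
--     body = ''
--     prev = None  # printability of the previous byte (None before the first)
--     for c in s.encode('utf-8'):
--         p = 0x20 <= c <= 0x7E
--         if p:
--             if prev is True:
--                 body += chr(c)
--             elif prev is False:
--                 body += ', b "' + chr(c)
--             else:
--                 body += 'b "' + chr(c)
--         else:
--             if prev is True:
--                 body += '", b ' + str(c)
--             elif prev is False:
--                 body += ' ' + str(c)
--             else:
--                 body += 'b ' + str(c)
--         prev = p
--     if prev is True:
--         body += '"'
--     if include_null_terminator:
--         body += ', b 0' if prev is not None else 'b 0'
--     return '{ ' + body + '}', len(s.encode('utf-8')) + int(include_null_terminator)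
-- ===== Notes on version B (the rewrite author's own statement) =====
-- stated objective: alternative
-- what changed: Replaces groupby run-grouping + an intermediate str/list group list + a separate formatting loop + a summed group-length pass by a byte-at-a-time state machine that emits one string fragment per printability transition (opening/closing/extending literals on the fly), with the length taken straight from the byte count.
import Mathlib
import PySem

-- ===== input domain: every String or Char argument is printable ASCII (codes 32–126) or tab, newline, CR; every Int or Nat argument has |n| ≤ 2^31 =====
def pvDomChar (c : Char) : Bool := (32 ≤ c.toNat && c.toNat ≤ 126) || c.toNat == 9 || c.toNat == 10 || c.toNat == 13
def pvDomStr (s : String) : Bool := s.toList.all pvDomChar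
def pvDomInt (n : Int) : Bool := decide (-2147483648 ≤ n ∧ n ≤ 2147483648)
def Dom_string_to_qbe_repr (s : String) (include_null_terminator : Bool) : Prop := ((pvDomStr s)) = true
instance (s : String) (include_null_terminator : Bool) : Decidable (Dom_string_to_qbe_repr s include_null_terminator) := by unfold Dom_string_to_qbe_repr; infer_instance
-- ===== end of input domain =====

-- B replaces A's groupby + intermediate group list + formatting loop + summed group lengths by a
-- byte-at-a-time state machine emitting one string fragment per printability TRANSITION, with the
-- length taken from the byte count (objective: alternative; no runs or item lists are materialized).
-- Exact on the ASCII domain Dom (there s.encode('utf-8') is the list of character codes).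

-- ===== PORT A =====
-- key of groupby: 0x20 <= c <= 0x7E
def pvKeyA (c : Nat) : Bool := 32 ≤ c && c ≤ 126

-- itertools.groupby over the byte list: maximal runs of equal key, in order
def pvGroupbyA : List Nat → List (Bool × List Nat)
  | [] => []
  | c :: rest =>
    let k := pvKeyA c
    (k, c :: rest.takeWhile (fun d => pvKeyA d == k)) ::
      pvGroupbyA (rest.dropWhile (fun d => pvKeyA d == k))
  termination_by l => l.length
  decreasing_by
    simpa using Nat.lt_succ_of_le (List.length_dropWhile_le _ rest)

-- ''.join(map(chr, values)) if key else list(values)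
def pvGroupElem (g : Bool × List Nat) : Sum String (List Nat) :=
  if g.1 then Sum.inl (String.ofList (g.2.map Char.ofNat)) else Sum.inr g.2

-- the items loop body
def pvItemA (e : Sum String (List Nat)) : String :=
  match e with
  | Sum.inl str => "b \"" ++ str ++ "\""
  | Sum.inr l => "b " ++ PySem.Str.join " " (l.map (fun c => PySem.Int.toStr (Int.ofNat c)))

-- len(element): len of a str / len of a list
def pvLenA (e : Sum String (List Nat)) : Int :=
  match e with
  | Sum.inl str => (str.toList.length : Int)
  | Sum.inr l => (l.length : Int)

def string_to_qbe_repr (s : String) (include_null_terminator : Bool) : String × Int :=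
  let bytes := s.toList.map Char.toNat   -- s.encode('utf-8'); exact on Dom (ASCII-only)
  let groups := (pvGroupbyA bytes).map pvGroupElem
  let items := groups.foldl (fun acc e => acc ++ [pvItemA e]) []
  let items := if include_null_terminator then items ++ ["b 0"] else items
  let qbe_str := "{ " ++ PySem.Str.join ", " items ++ "}"
  let length := (groups.map pvLenA).foldl (· + ·) 0 + (if include_null_terminator then 1 else 0)
  (qbe_str, length)

-- ===== PORT B =====
-- state machine step: prev printability (none before the first byte) × body so far;
-- each byte appends a fragment chosen by the (prev, current-printability) transition
def pvStepB (st : Option Bool × String) (c : Nat) : Option Bool × String :=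
  let p := 32 ≤ c && c ≤ 126
  (some p,
    if p then
      match st.1 with
      | some true  => st.2 ++ String.ofList [Char.ofNat c]
      | some false => st.2 ++ ", b \"" ++ String.ofList [Char.ofNat c]
      | none       => st.2 ++ "b \"" ++ String.ofList [Char.ofNat c]
    else
      match st.1 with
      | some true  => st.2 ++ "\", b " ++ PySem.Int.toStr (Int.ofNat c)
      | some false => st.2 ++ " " ++ PySem.Int.toStr (Int.ofNat c)
      | none       => st.2 ++ "b " ++ PySem.Int.toStr (Int.ofNat c))

def string_to_qbe_repr_alt (s : String) (include_null_terminator : Bool) : String × Int :=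
  let data := s.toList.map Char.toNat    -- s.encode('utf-8'); exact on Dom (ASCII-only)
  let st := data.foldl pvStepB (none, "")
  let body := if st.1 = some true then st.2 ++ "\"" else st.2
  let body := if include_null_terminator then
      body ++ (if st.1.isSome then ", b 0" else "b 0") else body
  ("{ " ++ body ++ "}", (data.length : Int) + (if include_null_terminator then 1 else 0))

-- ===== PRECONDITION & SPEC =====
def Spec_string_to_qbe_repr (s : String) (include_null_terminator : Bool) (out : String × Int) : Prop := out = string_to_qbe_repr_alt s include_null_terminator
instance (s : String) (include_null_terminator : Bool) (out : String × Int) : Decidable (Spec_string_to_qbe_repr s include_null_terminator out) := by unfold Spec_string_to_qbe_repr; infer_instance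

-- ===== CLAIM (what is proved, stated in full; the proofs are below) =====
def Claim_equal_string_to_qbe_repr : Prop := ∀ (s : String) (include_null_terminator : Bool), Dom_string_to_qbe_repr s include_null_terminator → Spec_string_to_qbe_repr s include_null_terminator (string_to_qbe_repr s include_null_terminator)

-- ===== LEMMAS AND PROOFS =====

-- A's items, by name
def pvItemsA (bs : List Nat) : List String :=
  (pvGroupbyA bs).map (fun g => pvItemA (pvGroupElem g))

-- characters of B's body once the possibly dangling printable literal is closed
def pvCloseL (st : Option Bool × String) : List Char :=
  st.2.toList ++ (if st.1 = some true then ['"'] else [])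

-- tail of a uniform run as emitted by B, in characters
def pvTail (k : Bool) (l : List Nat) : List Char :=
  if k then l.map Char.ofNat else l.flatMap (fun d => ' ' :: PySem.Int.toChars (Int.ofNat d))

-- boundary invariant: the state's printability differs from the next byte's
def pvOk : Option Bool → List Nat → Prop
  | some p, c :: _ => pvKeyA c = !p
  | _, _ => True

theorem pv_foldl_append {α β : Type} (f : α → β) :
    ∀ (l : List α) (acc : List β),
      l.foldl (fun acc e => acc ++ [f e]) acc = acc ++ l.map f := by
  intro l
  induction l with
  | nil => simp
  | cons x xs ih => intro acc; simp [List.foldl, ih, List.append_assoc]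

-- ' '.join over a nonempty list of rendered bytes, in characters
theorem pv_join_space (c : Nat) : ∀ tw : List Nat,
    PySem.Chars.join [' '] (PySem.Int.toChars (Nat.cast c) :: tw.map (fun x => PySem.Int.toChars (Nat.cast x)))
      = PySem.Int.toChars (Nat.cast c) ++ tw.flatMap (fun d => ' ' :: PySem.Int.toChars (Nat.cast d)) := by
  intro tw
  induction tw generalizing c with
  | nil => simp [PySem.Chars.join_singleton]
  | cons d tw ih =>
    rw [List.map_cons, PySem.Chars.join_cons_cons, ih d]
    simp [List.append_assoc]

-- ', '.join with the null terminator appended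
theorem pv_join_term (sep : List Char) (x : List Char) : ∀ l : List (List Char), l ≠ [] →
    PySem.Chars.join sep (l ++ [x]) = PySem.Chars.join sep l ++ sep ++ x := by
  intro l
  induction l with
  | nil => simp
  | cons a l ih =>
    intro _
    cases l with
    | nil => simp [PySem.Chars.join_cons_cons, PySem.Chars.join_singleton]
    | cons b l =>
      have h := ih (by simp)
      simp only [List.cons_append] at h ⊢
      rw [PySem.Chars.join_cons_cons, PySem.Chars.join_cons_cons, h]
      simp [List.append_assoc]

-- after any nonempty input the state's printability is set
theorem pv_state_some : ∀ (bs : List Nat) (st : Option Bool × String), bs ≠ [] →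
    (bs.foldl pvStepB st).1.isSome = true := by
  intro bs
  induction bs with
  | nil => simp
  | cons c rest ih =>
    intro st _
    cases rest with
    | nil => simp [pvStepB]
    | cons d rest' => exact ih _ (by simp)

-- folding B over a uniform-printability run from a matching state
theorem pv_run (k : Bool) : ∀ (l : List Nat) (acc : String),
    (∀ d ∈ l, pvKeyA d = k) →
    (l.foldl pvStepB (some k, acc)).1 = some k ∧
    ((l.foldl pvStepB (some k, acc)).2).toList = acc.toList ++ pvTail k l := by
  intro l
  induction l with
  | nil => intro acc _; simp [pvTail]
  | cons d l ih =>
    intro acc h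
    have hd : pvKeyA d = k := h d (by simp)
    have hk : (decide (32 ≤ d) && decide (d ≤ 126)) = k := hd
    cases k with
    | true =>
      have hstep : pvStepB (some true, acc) d = (some true, acc ++ String.ofList [Char.ofNat d]) := by
        simp [pvStepB, hk]
      rw [List.foldl_cons, hstep]
      obtain ⟨h1, h2⟩ := ih (acc ++ String.ofList [Char.ofNat d]) (fun x hx => h x (by simp [hx]))
      exact ⟨h1, by rw [h2]; simp [pvTail, List.append_assoc]⟩
    | false =>
      have hstep : pvStepB (some false, acc) d =
          (some false, acc ++ " " ++ PySem.Int.toStr (Int.ofNat d)) := by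
        simp [pvStepB, hk]
      rw [List.foldl_cons, hstep]
      obtain ⟨h1, h2⟩ := ih (acc ++ " " ++ PySem.Int.toStr (Int.ofNat d)) (fun x hx => h x (by simp [hx]))
      exact ⟨h1, by rw [h2]; simp [pvTail, PySem.Int.toList_toStr, List.append_assoc]⟩

-- MAIN INVARIANT: closing B's fold over bs from a boundary-compatible state appends
-- exactly A's ', '-joined items for bs (with a leading ', ' when a previous item exists)
theorem pv_main : ∀ (bs : List Nat) (prev : Option Bool) (acc : String), pvOk prev bs →
    pvCloseL (bs.foldl pvStepB (prev, acc)) =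
      pvCloseL (prev, acc) ++
        (if bs.isEmpty then [] else
          (if prev.isSome then [',', ' '] else []) ++
            PySem.Chars.join [',', ' '] ((pvItemsA bs).map String.toList)) := by
  intro bs
  fun_induction pvGroupbyA bs with
  | case1 => intro prev acc _; simp
  | case2 c rest k ih =>
    intro prev acc hok
    have hsplit : c :: rest =
        (c :: rest.takeWhile (fun d => pvKeyA d == k)) ++ rest.dropWhile (fun d => pvKeyA d == k) := by
      simp [List.takeWhile_append_dropWhile]
    have hcase : prev = none ∨ prev = some (!k) := by
      cases prev with
      | none => exact Or.inl rfl
      | some p =>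
        right
        have hkc : pvKeyA c = !p := hok
        have hkp : k = !p := hkc
        simp [hkp]
    rw [hsplit, List.foldl_append, List.foldl_cons]
    have hk : (decide (32 ≤ c) && decide (c ≤ 126)) = k := rfl
    set tw := rest.takeWhile (fun d => pvKeyA d == k) with htw
    set dw := rest.dropWhile (fun d => pvKeyA d == k) with hdw
    have htwkey : ∀ d ∈ tw, pvKeyA d = k := by
      intro d hd
      have := List.mem_takeWhile_imp hd
      simpa using this
    -- the opening byte: state becomes (some k, acc1)
    obtain ⟨acc1, hstep, hacc1⟩ :
        ∃ acc1, pvStepB (prev, acc) c = (some k, acc1) ∧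
          acc1.toList ++ pvTail k tw ++ (if k then ['"'] else []) =
            pvCloseL (prev, acc) ++ (if prev.isSome then [',', ' '] else []) ++
              (pvItemA (pvGroupElem (k, c :: tw))).toList := by
      rcases hcase with hprev | hprev <;> subst hprev <;> cases hkk : k <;>
        simp only [hkk, Bool.not_false, Bool.not_true] at hk ⊢
      · refine ⟨acc ++ "b " ++ PySem.Int.toStr (Int.ofNat c), by simp [pvStepB, hk], ?_⟩
        simp [pvCloseL, pvGroupElem, pvItemA, pvTail,
          PySem.Str.toList_join, PySem.Int.toList_toStr, List.map_map,
          Function.comp_def, List.append_assoc]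
        exact (pv_join_space c tw).symm
      · exact ⟨acc ++ "b \"" ++ String.ofList [Char.ofNat c], by simp [pvStepB, hk],
          by simp [pvCloseL, pvGroupElem, pvItemA, pvTail,
            List.append_assoc]⟩
      · refine ⟨acc ++ "\", b " ++ PySem.Int.toStr (Int.ofNat c), by simp [pvStepB, hk], ?_⟩
        simp [pvCloseL, pvGroupElem, pvItemA, pvTail,
          PySem.Str.toList_join, PySem.Int.toList_toStr, List.map_map,
          Function.comp_def, List.append_assoc]
        exact (pv_join_space c tw).symm
      · exact ⟨acc ++ ", b \"" ++ String.ofList [Char.ofNat c], by simp [pvStepB, hk],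
          by simp [pvCloseL, pvGroupElem, pvItemA, pvTail,
            List.append_assoc]⟩
    rw [hstep]
    obtain ⟨h1, h2⟩ := pv_run k tw acc1 htwkey
    have hokdw : pvOk (some k) dw := by
      cases hdwc : dw with
      | nil => trivial
      | cons d0 dws =>
        have : (fun d => pvKeyA d == k) d0 = false := by
          have := List.head_dropWhile_not (fun d => pvKeyA d == k) (l := rest)
            (by rw [← hdw]; simp [hdwc])
          simpa [← hdw, hdwc] using this
        show pvKeyA d0 = !k
        have hne : pvKeyA d0 ≠ k := by simpa using this
        exact Bool.eq_not_of_ne hne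
    have hpair : tw.foldl pvStepB (some k, acc1) = (some k, (tw.foldl pvStepB (some k, acc1)).2) := by
      rw [Prod.ext_iff]
      exact ⟨h1, rfl⟩
    rw [hpair, ih _ _ hokdw]
    have hitems : pvItemsA (c :: tw ++ dw) = pvItemA (pvGroupElem (k, c :: tw)) :: pvItemsA dw := by
      rw [← hsplit, pvItemsA, pvGroupbyA]
      simp only [List.map_cons]
      rfl
    have hclose2 : pvCloseL (some k, (tw.foldl pvStepB (some k, acc1)).2) =
        pvCloseL (prev, acc) ++ (if prev.isSome then [',', ' '] else []) ++
          (pvItemA (pvGroupElem (k, c :: tw))).toList := by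
      rw [← hacc1, pvCloseL, h2]
      cases k <;> simp [List.append_assoc]
    rw [hclose2, hitems]
    cases hdwc : pvItemsA dw with
    | nil =>
      have hdwnil : dw = [] := by
        by_contra hne
        cases hdn : dw with
        | nil => exact hne hdn
        | cons d0 dws =>
          rw [pvItemsA, hdn, pvGroupbyA] at hdwc
          simp at hdwc
      simp [hdwnil, PySem.Chars.join_singleton, List.append_assoc]
    | cons i0 irest =>
      have hdwne : dw ≠ [] := by
        intro hdn
        rw [pvItemsA, hdn] at hdwc
        simp [pvGroupbyA] at hdwc
      simp only [List.map_cons]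
      rw [PySem.Chars.join_cons_cons]
      simp [hdwne, List.append_assoc]

-- summed group lengths = byte count
theorem pv_len_eq : ∀ (bs : List Nat),
    (((pvGroupbyA bs).map pvGroupElem).map pvLenA).foldl (· + ·) 0
      = (bs.length : Int) := by
  have key : ∀ bs : List Nat, ∀ a : Int,
      (((pvGroupbyA bs).map pvGroupElem).map pvLenA).foldl (· + ·) a
        = a + (bs.length : Int) := by
    intro bs
    fun_induction pvGroupbyA bs with
    | case1 => simp
    | case2 c rest k ih =>
      intro a
      simp only [List.map_cons, List.foldl_cons, ih]
      have hsplit : (rest.takeWhile (fun d => pvKeyA d == k)).length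
          + (rest.dropWhile (fun d => pvKeyA d == k)).length = rest.length := by
        rw [← List.length_append, List.takeWhile_append_dropWhile]
      have hlen : pvLenA (pvGroupElem (k, c :: rest.takeWhile (fun d => pvKeyA d == k)))
          = ((c :: rest.takeWhile (fun d => pvKeyA d == k)).length : Int) := by
        by_cases hk : k = true <;> simp [pvGroupElem, pvLenA, hk, -String.length_toList]
      rw [hlen]
      simp only [List.length_cons]
      push_cast
      omega
  intro bs
  simpa using key bs 0

-- items of A, as a map
theorem pv_itemsA_eq (bs : List Nat) :
    ((pvGroupbyA bs).map pvGroupElem).map pvItemA = pvItemsA bs := by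
  simp [pvItemsA, List.map_map, Function.comp_def]

-- A's item list is empty exactly on empty input
theorem pv_itemsA_ne (bs : List Nat) (h : bs ≠ []) : pvItemsA bs ≠ [] := by
  cases bs with
  | nil => exact absurd rfl h
  | cons c rest => rw [pvItemsA, pvGroupbyA]; simp

-- ===== VERDICT (by name: the statement is the Claim_ definition above) =====
theorem string_to_qbe_repr_spec : Claim_equal_string_to_qbe_repr := by
  unfold Claim_equal_string_to_qbe_repr
  intro s b _
  unfold Spec_string_to_qbe_repr string_to_qbe_repr string_to_qbe_repr_alt
  simp only [pv_foldl_append, List.nil_append, pv_itemsA_eq]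
  rw [Prod.ext_iff]
  set bs := s.toList.map Char.toNat with hbs
  constructor
  · -- the string components
    apply String.toList_inj.mp
    have hmain := pv_main bs none "" trivial
    set st := bs.foldl pvStepB (none, "") with hst
    have hbody : ((if st.1 = some true then st.2 ++ "\"" else st.2)).toList = pvCloseL st := by
      rw [pvCloseL]
      split_ifs <;> simp
    by_cases hbe : bs = []
    · have hstn : st = (none, "") := by rw [hst, hbe]; rfl
      have hgn : pvItemsA bs = [] := by rw [hbe, pvItemsA, pvGroupbyA]; rfl
      cases b <;>
        simp [hgn, hstn, PySem.Str.toList_join, PySem.Chars.join_singleton,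
          PySem.Chars.join_nil, String.toList_append]
    · have hsome : st.1.isSome = true := pv_state_some bs (none, "") hbe
      have hmain' : pvCloseL st = PySem.Chars.join [',', ' '] ((pvItemsA bs).map String.toList) := by
        rw [hmain]
        simp [hbe, pvCloseL]
      have hine : (pvItemsA bs).map String.toList ≠ [] := by
        simp [pv_itemsA_ne bs hbe]
      cases b
      · simp [String.toList_append, hbody, hmain', PySem.Str.toList_join]
      · simp [hsome, String.toList_append, hbody, hmain', PySem.Str.toList_join,
          List.map_append, pv_join_term [',', ' '] ['b', ' ', '0'] _ hine, List.append_assoc]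
  · -- the length components
    have := pv_len_eq bs
    simp only [this]
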